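-- pv_equiv track=rewrite | github.com/naa/FreeFermionsLimitShapes | azteclozenge.py | tableau_to_pattern
-- ===== SOURCE A (Python) =====
-- def tableau_to_pattern(tableau,n):
--     pre=[]
--     res=[]
--     for i in range(1,n+1):
--         nl=[]
--         pre=pre+[0]
--         for j in range(i):
--             if j<len(tableau):
--                 nl.append(tableau[j].count(i)+pre[j])
--             else:
--                 nl.append(0)
--         pre=nl
--         res.append(nl)
--     return list(reversed(res))
-- ===== SOURCE B (Python) =====
-- def tableau_to_pattern(tableau, n):
--     # Each pattern cell computed independently (closed form): cell (i, j) counts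
--     # the entries of tableau[j] lying in range(j+1, i+1); rows are built from
--     # i = n down to 1, so no reversal and no carried accumulator is needed.
--     return [[sum(1 for x in tableau[j] if j + 1 <= x <= i) if j < len(tableau) else 0
--              for j in range(i)]
--             for i in range(n, 0, -1)]
-- ===== Notes on version B (the rewrite author's own statement) =====
-- stated objective: alternative
-- what changed: Replaced the row-to-row carried `pre` accumulator with an independent closed-form count per cell (entries of tableau[j] lying in range(j+1, i+1)), building rows from n down to 1 so the final reversal pass disappears.
import Mathlib
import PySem

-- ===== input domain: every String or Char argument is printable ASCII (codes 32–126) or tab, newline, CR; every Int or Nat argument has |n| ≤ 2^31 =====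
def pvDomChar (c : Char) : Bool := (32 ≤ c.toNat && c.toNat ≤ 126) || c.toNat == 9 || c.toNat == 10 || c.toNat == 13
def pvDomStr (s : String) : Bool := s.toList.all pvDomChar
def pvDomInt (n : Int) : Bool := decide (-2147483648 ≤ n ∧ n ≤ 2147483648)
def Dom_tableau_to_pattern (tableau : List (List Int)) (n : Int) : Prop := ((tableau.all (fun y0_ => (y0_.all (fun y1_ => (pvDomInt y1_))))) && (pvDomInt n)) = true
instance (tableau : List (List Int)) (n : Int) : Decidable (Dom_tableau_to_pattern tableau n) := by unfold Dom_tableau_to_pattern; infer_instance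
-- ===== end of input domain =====

-- B replaces A's carried `pre` accumulator by an independent closed-form count per cell
-- (entries of tableau[j] in range(j+1, i+1)), building rows from n down to 1 so no
-- reversal pass is needed (objective: alternative).

-- ===== PORT A =====
def tableau_to_pattern (tableau : List (List Int)) (n : Int) : List (List Int) :=
  ((PySem.List.pyRange 1 (n + 1) 1).foldl
    (fun (st : List Int × List (List Int)) i =>
      let pre := st.1 ++ [0]
      let nl := (PySem.List.pyRange 0 i 1).foldl
        (fun nl j =>
          if j < PySem.List.len tableau then
            nl ++ [((PySem.List.pyGetD tableau j []).count i : Int) + PySem.List.pyGetD pre j 0]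
          else
            nl ++ [0]) []
      (nl, st.2 ++ [nl])) ([], [])).2.reverse

-- ===== PORT B =====
def tableau_to_pattern_alt (tableau : List (List Int)) (n : Int) : List (List Int) :=
  (PySem.List.pyRange n 0 (-1)).map (fun i =>
    (PySem.List.pyRange 0 i 1).map (fun j =>
      if j < PySem.List.len tableau then
        ((tableau.getD j.toNat []).countP (fun x => decide (j + 1 ≤ x ∧ x ≤ i)) : Int)
      else
        0))

-- ===== PRECONDITION & SPEC =====
def Spec_tableau_to_pattern (tableau : List (List Int)) (n : Int) (out : List (List Int)) : Prop := out = tableau_to_pattern_alt tableau n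
instance (tableau : List (List Int)) (n : Int) (out : List (List Int)) : Decidable (Spec_tableau_to_pattern tableau n out) := by unfold Spec_tableau_to_pattern; infer_instance

-- ===== CLAIM (what is proved, stated in full; the proofs are below) =====
def Claim_equal_tableau_to_pattern : Prop := ∀ (tableau : List (List Int)) (n : Int), Dom_tableau_to_pattern tableau n → Spec_tableau_to_pattern tableau n (tableau_to_pattern tableau n)

-- ===== LEMMAS AND PROOFS =====

def pvCell (tableau : List (List Int)) (i j : Int) : Int :=
  if j < PySem.List.len tableau then
    ((tableau.getD j.toNat []).countP (fun x => decide (j + 1 ≤ x ∧ x ≤ i)) : Int)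
  else 0

def pvRow (tableau : List (List Int)) (i : Int) : List Int :=
  (PySem.List.pyRange 0 i 1).map (pvCell tableau i)

theorem pvLen_row (tableau : List (List Int)) (i : Int) :
    (pvRow tableau i).length = i.toNat := by
  simp [pvRow, PySem.List.length_pyRange_one]

theorem pvCell_diag (tableau : List (List Int)) (j : Int) :
    pvCell tableau j j = 0 := by
  unfold pvCell
  split
  · rw [List.countP_eq_zero.mpr]
    · rfl
    · intro x _; simp only [decide_eq_true_eq]; omega
  · rfl

theorem pvPre_get (tableau : List (List Int)) (i j : Int) (h0 : 0 ≤ j) (h1 : j < i) :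
    PySem.List.pyGetD (pvRow tableau (i - 1) ++ [0]) j 0 = pvCell tableau (i - 1) j := by
  have hlen : (pvRow tableau (i - 1)).length = (i - 1).toNat := pvLen_row tableau (i - 1)
  rcases Decidable.em (j < i - 1) with hj | hj
  · rw [PySem.List.pyGetD_eq_getElem (xs := pvRow tableau (i - 1) ++ [0]) 0 h0 (by simp [hlen]; omega)]
    rw [List.getElem_append_left (by omega)]
    unfold pvRow
    rw [List.getElem_map, PySem.List.getElem_pyRange_one]
    have : (0 : Int) + (j.toNat : Int) = j := by omega
    rw [this]
  · have hji : j = i - 1 := by omega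
    subst hji
    rw [PySem.List.pyGetD_eq_getElem (xs := pvRow tableau (i - 1) ++ [0]) 0 h0 (by simp [hlen]; omega)]
    rw [List.getElem_append_right (by omega)]
    simp [hlen]
    exact (pvCell_diag tableau (i - 1)).symm

theorem pvCountP_split (l : List Int) (a i : Int) (h : a ≤ i) :
    (l.countP (fun x => decide (a ≤ x ∧ x ≤ i)) : Int)
      = (l.countP (fun x => decide (a ≤ x ∧ x ≤ i - 1)) : Int) + (l.count i : Int) := by
  induction l with
  | nil => simp
  | cons x xs ih =>
    rcases Decidable.em (x = i) with h3 | h3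
    · have hb : (x == i) = true := by simp [h3]
      have h1 : (a ≤ x ∧ x ≤ i) ↔ True := iff_true_intro ⟨by omega, by omega⟩
      have h2 : (a ≤ x ∧ x ≤ i - 1) ↔ False := by
        constructor
        · rintro ⟨u, v⟩; omega
        · intro hf; exact hf.elim
      simp only [List.countP_cons, List.count_cons, h1, h2, hb, decide_true, decide_false, if_true]
      push_cast
      omega
    · have hb : (x == i) = false := by simp [h3]
      have h4 : (a ≤ x ∧ x ≤ i) ↔ (a ≤ x ∧ x ≤ i - 1) := by
        constructor <;> rintro ⟨u, v⟩ <;> exact ⟨u, by omega⟩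
      simp only [List.countP_cons, List.count_cons, h4, hb]
      push_cast
      omega

theorem pvRow_succ_inner (tableau : List (List Int)) (i : Int) :
    (PySem.List.pyRange 0 i 1).foldl
      (fun nl j =>
        if j < PySem.List.len tableau then
          nl ++ [((PySem.List.pyGetD tableau j []).count i : Int)
                 + PySem.List.pyGetD (pvRow tableau (i - 1) ++ [0]) j 0]
        else nl ++ [0]) []
    = pvRow tableau i := by
  have hbody : (fun (nl : List Int) (j : Int) =>
        if j < PySem.List.len tableau then
          nl ++ [((PySem.List.pyGetD tableau j []).count i : Int)
                 + PySem.List.pyGetD (pvRow tableau (i - 1) ++ [0]) j 0]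
        else nl ++ [0])
      = (fun nl j => nl ++ [if j < PySem.List.len tableau then
          ((PySem.List.pyGetD tableau j []).count i : Int)
                 + PySem.List.pyGetD (pvRow tableau (i - 1) ++ [0]) j 0 else 0]) := by
    funext nl j; split <;> rfl
  rw [hbody, PySem.List.foldl_append_singleton_eq_map, List.nil_append,
    show pvRow tableau i = (PySem.List.pyRange 0 i 1).map (pvCell tableau i) from rfl]
  apply List.map_congr_left
  intro j hj
  rw [PySem.List.mem_pyRange_one] at hj
  rw [pvPre_get tableau i j hj.1 hj.2]
  rcases Decidable.em (j < PySem.List.len tableau) with hl | hl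
  · rw [if_pos hl]
    unfold pvCell
    rw [if_pos hl, if_pos hl]
    have hg : PySem.List.pyGetD tableau j [] = tableau.getD j.toNat [] := by
      have hjc : j = ((j.toNat : Nat) : Int) := by omega
      conv_lhs => rw [hjc, PySem.List.pyGetD_natCast]
    rw [hg, pvCountP_split _ (j + 1) i (by omega)]
    ring
  · rw [if_neg hl]
    unfold pvCell
    rw [if_neg hl]

theorem pvFold_invariant (tableau : List (List Int)) (k : Nat) :
    (PySem.List.pyRange 1 ((k : Int) + 1) 1).foldl
      (fun (st : List Int × List (List Int)) i =>
        let pre := st.1 ++ [0]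
        let nl := (PySem.List.pyRange 0 i 1).foldl
          (fun nl j =>
            if j < PySem.List.len tableau then
              nl ++ [((PySem.List.pyGetD tableau j []).count i : Int) + PySem.List.pyGetD pre j 0]
            else
              nl ++ [0]) []
        (nl, st.2 ++ [nl])) ([], [])
    = (pvRow tableau k, (PySem.List.pyRange 1 ((k : Int) + 1) 1).map (pvRow tableau)) := by
  induction k with
  | zero =>
    rw [PySem.List.pyRange_one_eq_nil (by omega)]
    simp [pvRow, PySem.List.pyRange_one_eq_nil]
  | succ m ih =>
    have hsplit : PySem.List.pyRange 1 ((m + 1 : Nat) + 1 : Int) 1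
        = PySem.List.pyRange 1 ((m : Int) + 1) 1 ++ [(m : Int) + 1] := by
      have hc : ((m + 1 : Nat) : Int) + 1 = ((m : Int) + 1) + 1 := by push_cast; ring
      rw [hc, PySem.List.pyRange_one_succ_right (by omega)]
    rw [hsplit, List.foldl_append, ih, List.map_append]
    simp only [List.foldl_cons, List.foldl_nil, List.map_cons, List.map_nil]
    have hrow : (PySem.List.pyRange 0 ((m : Int) + 1) 1).foldl
      (fun nl j =>
        if j < PySem.List.len tableau then
          nl ++ [((PySem.List.pyGetD tableau j []).count ((m : Int) + 1) : Int)
                 + PySem.List.pyGetD (pvRow tableau (m : Int) ++ [0]) j 0]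
        else nl ++ [0]) [] = pvRow tableau ((m : Int) + 1) := by
      have := pvRow_succ_inner tableau ((m : Int) + 1)
      simpa using this
    rw [hrow]
    norm_cast

theorem pvAlt_eq (tableau : List (List Int)) (n : Int) :
    tableau_to_pattern_alt tableau n
      = ((PySem.List.pyRange 1 (n + 1) 1).map (pvRow tableau)).reverse := by
  unfold tableau_to_pattern_alt
  have h1 : PySem.List.pyRange n 0 (-1) = (PySem.List.pyRange 1 (n + 1) 1).reverse := by
    rw [PySem.List.pyRange_neg_one_eq_reverse]; norm_num
  rw [h1, List.map_reverse]
  rfl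

theorem pvMain (tableau : List (List Int)) (n : Int) :
    tableau_to_pattern tableau n = tableau_to_pattern_alt tableau n := by
  rw [pvAlt_eq]
  unfold tableau_to_pattern
  by_cases hn : n ≤ 0
  · rw [PySem.List.pyRange_one_eq_nil (by omega)]
    simp
  · have hk : n = ((n.toNat : Nat) : Int) := by omega
    rw [hk, pvFold_invariant tableau n.toNat]

-- ===== VERDICT (by name: the statement is the Claim_ definition above) =====
theorem tableau_to_pattern_spec : Claim_equal_tableau_to_pattern := by
  intro tableau n _
  unfold Spec_tableau_to_pattern
  exact pvMain tableau n
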